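-- pv_equiv track=rewrite | github.com/S0NGMinHyuk/Algorithm-Coding-Test | 프로그래머스/2/172927. 광물 캐기/광물 캐기.py | getWork
-- ===== SOURCE A (Python) =====
-- def getWork(i, arr):
--     # 다이아곡괭이
--     if i == 0:
--         work = len(arr)
--     # 철곡괭이
--     elif i == 1:
--         work = 0
--         for mineral in arr:
--             work += 5 if mineral == "diamond" else 1
--     # 돌곡괭이
--     else:
--         work = 0
--         for mineral in arr:
--             if mineral == "diamond":
--                 work += 25
--             elif mineral == "iron":
--                 work += 5
--             else:
--                 work += 1
--
--     return work
-- ===== SOURCE B (Python) =====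
-- def getWork(i, arr):
--     if i == 0:
--         return len(arr)
--     d = arr.count("diamond")
--     if i == 1:
--         return len(arr) + 4 * d
--     return len(arr) + 24 * d + 4 * arr.count("iron")
-- ===== Notes on version B (the rewrite author's own statement) =====
-- stated objective: simpler
-- what changed: Replaced the per-element branching accumulator loops by counting occurrences of 'diamond' and 'iron' once and computing the result with a closed-form arithmetic expression over the counts.
import Mathlib
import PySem

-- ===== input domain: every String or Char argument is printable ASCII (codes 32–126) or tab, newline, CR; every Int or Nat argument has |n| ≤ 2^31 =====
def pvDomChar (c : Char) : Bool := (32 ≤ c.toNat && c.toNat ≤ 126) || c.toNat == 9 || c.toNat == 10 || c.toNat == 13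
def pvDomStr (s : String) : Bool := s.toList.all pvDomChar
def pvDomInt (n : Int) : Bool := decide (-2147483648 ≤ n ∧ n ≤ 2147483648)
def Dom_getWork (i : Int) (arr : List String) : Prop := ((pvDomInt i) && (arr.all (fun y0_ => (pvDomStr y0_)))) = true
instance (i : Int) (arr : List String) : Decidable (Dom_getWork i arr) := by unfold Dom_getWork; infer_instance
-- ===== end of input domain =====

-- B replaces A's per-element branching accumulator loops with count-then-combine arithmetic over the "diamond"/"iron" counts (objective: simpler).


-- ===== PORT A =====
-- loop bodies of A, kept as named step functions
def ironStep (work : Int) (mineral : String) : Int :=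
  work + (if mineral == "diamond" then 5 else 1)

def stoneStep (work : Int) (mineral : String) : Int :=
  if mineral == "diamond" then work + 25
  else if mineral == "iron" then work + 5
  else work + 1

def getWork (i : Int) (arr : List String) : Int :=
  if i == 0 then
    (arr.length : Int)
  else if i == 1 then
    arr.foldl ironStep 0
  else
    arr.foldl stoneStep 0

-- ===== PORT B =====
-- B: count 'diamond'/'iron' once (PySem.List.count = Python list.count), then a closed-form combination.
def getWork_alt (i : Int) (arr : List String) : Int :=
  if i == 0 then
    (arr.length : Int)
  else
    let d : Int := PySem.List.count arr "diamond"
    if i == 1 then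
      (arr.length : Int) + 4 * d
    else
      (arr.length : Int) + 24 * d + 4 * PySem.List.count arr "iron"

-- ===== PRECONDITION & SPEC =====
def Spec_getWork (i : Int) (arr : List String) (out : Int) : Prop := out = getWork_alt i arr
instance (i : Int) (arr : List String) (out : Int) : Decidable (Spec_getWork i arr out) := by unfold Spec_getWork; infer_instance

-- ===== CLAIM (what is proved, stated in full; the proofs are below) =====
def Claim_equal_getWork : Prop := ∀ (i : Int) (arr : List String), Dom_getWork i arr → Spec_getWork i arr (getWork i arr)

-- ===== LEMMAS AND PROOFS =====

lemma foldl_iron (arr : List String) (w : Int) :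
    arr.foldl ironStep w
      = w + (arr.length : Int) + 4 * PySem.List.count arr "diamond" := by
  induction arr generalizing w with
  | nil => simp [PySem.List.count]
  | cons a t ih =>
    rw [List.foldl_cons, ih]
    simp only [PySem.List.count, ironStep, List.count_cons, List.length_cons]
    by_cases h : a = "diamond" <;> simp [h] <;> push_cast <;> ring

lemma foldl_stone (arr : List String) (w : Int) :
    arr.foldl stoneStep w
      = w + (arr.length : Int) + 24 * PySem.List.count arr "diamond"
          + 4 * PySem.List.count arr "iron" := by
  induction arr generalizing w with
  | nil => simp [PySem.List.count]
  | cons a t ih =>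
    rw [List.foldl_cons, ih]
    simp only [PySem.List.count, stoneStep, List.count_cons, List.length_cons]
    by_cases h1 : a = "diamond"
    · simp [h1]; push_cast; ring
    · by_cases h2 : a = "iron" <;> simp [h1, h2] <;> push_cast <;> ring

-- ===== VERDICT =====
theorem getWork_spec : Claim_equal_getWork := by
  intro i arr _
  unfold Spec_getWork getWork getWork_alt
  by_cases h0 : i = 0
  · simp [h0]
  · by_cases h1 : i = 1 <;> simp only [h0, h1] <;>
      simp [foldl_iron, foldl_stone]
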